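-- pv_equiv track=rewrite | github.com/Nghia03092004/nghia03092004.github.io | project_euler_unified/problem_036/solution.py | generate_base10_palindromes
-- ===== SOURCE A (Python) =====
-- def generate_base10_palindromes(limit):
--     pals = []
--     for a in range(1, 10):
--         if a < limit: pals.append(a)
--     for a in range(1, 10):
--         n = a * 11
--         if n < limit: pals.append(n)
--     for a in range(1, 10):
--         for b in range(10):
--             n = a * 101 + b * 10
--             if n < limit: pals.append(n)
--     for a in range(1, 10):
--         for b in range(10):
--             n = a * 1001 + b * 110
--             if n < limit: pals.append(n)
--     for a in range(1, 10):
--         for b in range(10):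
--             for c in range(10):
--                 n = a * 10001 + b * 1010 + c * 100
--                 if n < limit: pals.append(n)
--     for a in range(1, 10):
--         for b in range(10):
--             for c in range(10):
--                 n = a * 100001 + b * 10010 + c * 1100
--                 if n < limit: pals.append(n)
--     return pals
-- ===== SOURCE B (Python) =====
-- def generate_base10_palindromes(limit):
--     pals = []
--     for length in range(1, 7):
--         h = (length + 1) // 2
--         for half in range(10 ** (h - 1), 10 ** h):
--             s = str(half)
--             pal = s + (s[:-1][::-1] if length % 2 else s[::-1])
--             n = int(pal)
--             if n < limit:
--                 pals.append(n)
--     return pals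
-- ===== Notes on version B (the rewrite author's own statement) =====
-- stated objective: idiomatic
-- what changed: Replaced A's six hardcoded arithmetic digit-loop blocks with a single loop over palindrome lengths 1..6 that builds each palindrome by string-mirroring an increasing half value.
import Mathlib
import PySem

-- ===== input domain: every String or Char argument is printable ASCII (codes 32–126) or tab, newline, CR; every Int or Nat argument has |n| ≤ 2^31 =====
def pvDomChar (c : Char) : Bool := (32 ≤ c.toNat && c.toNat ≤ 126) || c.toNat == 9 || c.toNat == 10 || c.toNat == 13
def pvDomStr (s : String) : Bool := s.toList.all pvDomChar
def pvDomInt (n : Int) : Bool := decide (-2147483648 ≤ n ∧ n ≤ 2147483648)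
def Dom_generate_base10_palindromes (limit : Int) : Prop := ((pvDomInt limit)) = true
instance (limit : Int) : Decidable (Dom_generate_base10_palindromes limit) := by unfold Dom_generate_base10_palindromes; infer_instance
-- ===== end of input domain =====

-- B replaces A's six hardcoded digit-loop blocks with one loop over palindrome
-- lengths 1..6 that mirrors the decimal string of an increasing "half" (idiomatic).

-- ===== PORT A =====
def generate_base10_palindromes (limit : Int) : List Int :=
  let pals := (PySem.List.pyRange 1 10 1).foldl
    (fun pals a => if a < limit then pals ++ [a] else pals) []
  let pals := (PySem.List.pyRange 1 10 1).foldl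
    (fun pals a => if a * 11 < limit then pals ++ [a * 11] else pals) pals
  let pals := (PySem.List.pyRange 1 10 1).foldl
    (fun pals a => (PySem.List.pyRange 0 10 1).foldl
      (fun pals b => if a * 101 + b * 10 < limit then pals ++ [a * 101 + b * 10] else pals) pals) pals
  let pals := (PySem.List.pyRange 1 10 1).foldl
    (fun pals a => (PySem.List.pyRange 0 10 1).foldl
      (fun pals b => if a * 1001 + b * 110 < limit then pals ++ [a * 1001 + b * 110] else pals) pals) pals
  let pals := (PySem.List.pyRange 1 10 1).foldl
    (fun pals a => (PySem.List.pyRange 0 10 1).foldl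
      (fun pals b => (PySem.List.pyRange 0 10 1).foldl
        (fun pals c => if a * 10001 + b * 1010 + c * 100 < limit then pals ++ [a * 10001 + b * 1010 + c * 100] else pals) pals) pals) pals
  let pals := (PySem.List.pyRange 1 10 1).foldl
    (fun pals a => (PySem.List.pyRange 0 10 1).foldl
      (fun pals b => (PySem.List.pyRange 0 10 1).foldl
        (fun pals c => if a * 100001 + b * 10010 + c * 1100 < limit then pals ++ [a * 100001 + b * 10010 + c * 1100] else pals) pals) pals) pals
  pals

-- ===== PORT B =====
-- str(half) + (s[:-1][::-1] if length % 2 else s[::-1]); int(pal).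
-- 10 ** (h-1) / 10 ** h are ported with .toNat exponents: the exponents h-1, h are
-- nonnegative here (h ∈ {1,2,3}), so this is exact.
def pvMirror (length half : Int) : Option Int :=
  let s := PySem.Int.toChars half
  let pal := s ++ (if PySem.Int.mod length 2 ≠ 0 then s.dropLast.reverse else s.reverse)
  PySem.Int.ofChars? pal

def generate_base10_palindromes_alt (limit : Int) : List Int :=
  (PySem.List.pyRange 1 7 1).foldl (fun pals length =>
    let h := PySem.Int.floordiv (length + 1) 2
    (PySem.List.pyRange ((10:Int) ^ (h - 1).toNat) ((10:Int) ^ h.toNat) 1).foldl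
      (fun pals half =>
        match pvMirror length half with
        | some n => if n < limit then pals ++ [n] else pals
        | none => pals) pals) []

-- ===== PRECONDITION & SPEC =====
def Spec_generate_base10_palindromes (limit : Int) (out : List Int) : Prop := out = generate_base10_palindromes_alt limit
instance (limit : Int) (out : List Int) : Decidable (Spec_generate_base10_palindromes limit out) := by unfold Spec_generate_base10_palindromes; infer_instance

-- ===== CLAIM (what is proved, stated in full; the proofs are below) =====
def Claim_equal_generate_base10_palindromes : Prop := ∀ (limit : Int), Dom_generate_base10_palindromes limit → Spec_generate_base10_palindromes limit (generate_base10_palindromes limit)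

-- ===== LEMMAS AND PROOFS =====

-- 'for x in l: if f x < limit: out.append(f x)' emits the filtered map.
theorem pv_emit (l : List Int) (f : Int → Int) (limit : Int) (acc : List Int) :
    l.foldl (fun acc x => if f x < limit then acc ++ [f x] else acc) acc
      = acc ++ ((l.map f).filter (fun n => decide (n < limit))) := by
  induction l generalizing acc with
  | nil => simp
  | cons x xs ih => simp only [List.foldl_cons, List.map_cons, List.filter_cons, ih]; split_ifs <;> simp_all <;> omega

-- same, through an Option-producing step (int(...) in B).
theorem pv_emitOpt (l : List Int) (g : Int → Option Int) (limit : Int) (acc : List Int) :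
    l.foldl (fun acc x => match g x with
      | some n => if n < limit then acc ++ [n] else acc
      | none => acc) acc
      = acc ++ ((l.filterMap g).filter (fun n => decide (n < limit))) := by
  induction l generalizing acc with
  | nil => simp
  | cons x xs ih =>
    simp only [List.foldl_cons, List.filterMap_cons, ih]
    cases hg : g x with
    | none => simp
    | some n => simp only [List.filter_cons]; split_ifs <;> simp_all <;> omega

theorem pv_outer (l : List Int) (G : Int → List Int) (acc : List Int) :
    l.foldl (fun acc x => acc ++ G x) acc = acc ++ l.flatMap G := by
  induction l generalizing acc with
  | nil => simp
  | cons x xs ih => simp [List.foldl_cons, ih]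

-- the closed candidate lists of A's six blocks, in emission order
def pvCandsA : List Int :=
  ((PySem.List.pyRange 1 10 1).map (fun a => a)) ++
  ((PySem.List.pyRange 1 10 1).map (fun a => a * 11)) ++
  ((PySem.List.pyRange 1 10 1).flatMap (fun a => (PySem.List.pyRange 0 10 1).map (fun b => a * 101 + b * 10))) ++
  ((PySem.List.pyRange 1 10 1).flatMap (fun a => (PySem.List.pyRange 0 10 1).map (fun b => a * 1001 + b * 110))) ++
  ((PySem.List.pyRange 1 10 1).flatMap (fun a => (PySem.List.pyRange 0 10 1).flatMap (fun b => (PySem.List.pyRange 0 10 1).map (fun c => a * 10001 + b * 1010 + c * 100)))) ++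
  ((PySem.List.pyRange 1 10 1).flatMap (fun a => (PySem.List.pyRange 0 10 1).flatMap (fun b => (PySem.List.pyRange 0 10 1).map (fun c => a * 100001 + b * 10010 + c * 1100))))

-- the closed candidate list of B's length loop
def pvCandsB : List Int :=
  (PySem.List.pyRange 1 7 1).flatMap (fun length =>
    let h := PySem.Int.floordiv (length + 1) 2
    (PySem.List.pyRange ((10:Int) ^ (h - 1).toNat) ((10:Int) ^ h.toNat) 1).filterMap (pvMirror length))

set_option maxRecDepth 100000 in
theorem pvCands_eq : pvCandsA = pvCandsB := by decide

theorem pvA_filter (limit : Int) :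
    generate_base10_palindromes limit = pvCandsA.filter (fun n => decide (n < limit)) := by
  unfold generate_base10_palindromes pvCandsA
  simp only [pv_emit, pv_outer, List.filter_flatMap, List.filter_append, List.nil_append]

theorem pvB_filter (limit : Int) :
    generate_base10_palindromes_alt limit = pvCandsB.filter (fun n => decide (n < limit)) := by
  unfold generate_base10_palindromes_alt pvCandsB
  simp only [pv_emitOpt, pv_outer, List.filter_flatMap, List.nil_append]

-- ===== VERDICT (by name: the statement is the Claim_ definition above) =====
theorem generate_base10_palindromes_spec : Claim_equal_generate_base10_palindromes := by
  intro limit _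
  unfold Spec_generate_base10_palindromes
  rw [pvA_filter, pvB_filter, pvCands_eq]
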